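-- pv_equiv track=rewrite | github.com/jpma-fernandes/BIOINF_1 | crossover_lab.py | index_at_residue
-- ===== SOURCE A (Python) =====
-- def index_at_residue(seq, num_residues):
--     count = 0
--     for i, char in enumerate(seq):
--         if char != '-':
--             count += 1
--             if count == num_residues:
--                 return i + 1
--     return len(seq)
-- ===== SOURCE B (Python) =====
-- def index_at_residue(seq, num_residues):
--     positions = [i for i, c in enumerate(seq) if c != '-']
--     if 1 <= num_residues <= len(positions):
--         return positions[num_residues - 1] + 1
--     return len(seq)
-- ===== Notes on version B (the rewrite author's own statement) =====
-- stated objective: alternative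
-- what changed: Replaces the running-counter early-return scan with an index table: build the list of positions of all non-gap characters once, then answer by direct lookup with a bounds guard.
import Mathlib
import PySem

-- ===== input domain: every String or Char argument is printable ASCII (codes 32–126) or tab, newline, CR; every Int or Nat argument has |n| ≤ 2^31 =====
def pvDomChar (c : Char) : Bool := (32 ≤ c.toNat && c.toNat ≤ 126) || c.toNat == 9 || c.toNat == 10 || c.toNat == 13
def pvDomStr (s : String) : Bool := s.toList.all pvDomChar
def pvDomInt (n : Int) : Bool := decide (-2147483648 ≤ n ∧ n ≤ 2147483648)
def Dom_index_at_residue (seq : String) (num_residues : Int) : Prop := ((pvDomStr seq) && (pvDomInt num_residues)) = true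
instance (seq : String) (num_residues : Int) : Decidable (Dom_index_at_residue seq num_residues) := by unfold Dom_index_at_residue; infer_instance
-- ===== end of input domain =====

-- B replaces A's running-counter early-return scan by an index table of non-gap positions plus a guarded lookup (objective: alternative, same cost).

-- ===== PORT A =====
-- the for-loop of A: scans characters, counting non-gaps, returns i+1 at the num_residues-th
def pvALoop (l : List Char) (i : Int) (count : Int) (num : Int) (len : Int) : Int :=
  match l with
  | [] => len
  | c :: rest =>
    if c ≠ '-' then
      if count + 1 = num then i + 1
      else pvALoop rest (i + 1) (count + 1) num len
    else pvALoop rest (i + 1) count num len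

def index_at_residue (seq : String) (num_residues : Int) : Int :=
  pvALoop seq.toList 0 0 num_residues (seq.toList.length : Int)

-- ===== PORT B =====
def index_at_residue_alt (seq : String) (num_residues : Int) : Int :=
  let positions : List Int :=
    (PySem.List.enumerate seq.toList 0).filterMap (fun p => if p.2 ≠ '-' then some p.1 else none)
  if 1 ≤ num_residues ∧ num_residues ≤ (positions.length : Int) then
    (PySem.List.pyGet? positions (num_residues - 1)).getD 0 + 1
  else (seq.toList.length : Int)

-- ===== PRECONDITION & SPEC =====
def Spec_index_at_residue (seq : String) (num_residues : Int) (out : Int) : Prop := out = index_at_residue_alt seq num_residues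
instance (seq : String) (num_residues : Int) (out : Int) : Decidable (Spec_index_at_residue seq num_residues out) := by unfold Spec_index_at_residue; infer_instance

-- ===== CLAIM (what is proved, stated in full; the proofs are below) =====
def Claim_equal_index_at_residue : Prop := ∀ (seq : String) (num_residues : Int), Dom_index_at_residue seq num_residues → Spec_index_at_residue seq num_residues (index_at_residue seq num_residues)

-- ===== LEMMAS AND PROOFS =====

-- the non-gap position table of l when its first character sits at index i
def pvPos (l : List Char) (i : Int) : List Int :=
  match l with
  | [] => []
  | c :: rest => if c ≠ '-' then i :: pvPos rest (i + 1) else pvPos rest (i + 1)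

lemma pvPos_eq_filterMap (l : List Char) (i : Int) :
    (PySem.List.enumerate l i).filterMap (fun p => if p.2 ≠ '-' then some p.1 else none) = pvPos l i := by
  induction l generalizing i with
  | nil => simp [PySem.List.enumerate_nil, pvPos]
  | cons c rest ih =>
    simp only [ne_eq, ite_not] at ih ⊢
    simp only [PySem.List.enumerate_cons, List.filterMap_cons, pvPos]
    by_cases h : c = '-' <;> simp [h, ih]

lemma pyGet?_cons_pos (x : Int) (xs : List Int) (k : Int) (hk : 1 ≤ k) :
    PySem.List.pyGet? (x :: xs) k = PySem.List.pyGet? xs (k - 1) := by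
  rw [PySem.List.pyGet?_of_nonneg _ (by omega : (0:Int) ≤ k),
      PySem.List.pyGet?_of_nonneg _ (by omega : (0:Int) ≤ k - 1)]
  have h : k.toNat = (k - 1).toNat + 1 := by omega
  rw [h]
  simp

lemma pvALoop_eq (l : List Char) (i count num len : Int) :
    pvALoop l i count num len =
      if 1 ≤ num - count ∧ num - count ≤ ((pvPos l i).length : Int) then
        (PySem.List.pyGet? (pvPos l i) (num - count - 1)).getD 0 + 1
      else len := by
  induction l generalizing i count with
  | nil =>
    simp only [pvALoop, pvPos, List.length_nil]
    rw [if_neg]; omega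
  | cons c rest ih =>
    simp only [pvALoop, pvPos]
    by_cases hc : c = '-'
    · simpa [hc] using ih (i + 1) count
    · simp only [ne_eq, hc, not_false_eq_true, if_true, List.length_cons]
      by_cases hn : count + 1 = num
      · have hcond : 1 ≤ num - count ∧ num - count ≤ (((pvPos rest (i + 1)).length + 1 : Nat) : Int) := by
          push_cast; omega
        have h1 : num - count - 1 = 0 := by omega
        rw [if_pos hn, if_pos hcond, h1, PySem.List.pyGet?_zero_cons]
        simp
      · rw [if_neg hn, ih (i + 1) (count + 1)]
        by_cases hin : 1 ≤ num - (count + 1) ∧ num - (count + 1) ≤ ((pvPos rest (i + 1)).length : Int)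
        · have hcond : 1 ≤ num - count ∧ num - count ≤ (((pvPos rest (i + 1)).length + 1 : Nat) : Int) := by
            push_cast
            omega
          rw [if_pos hin, if_pos hcond, pyGet?_cons_pos _ _ _ (by omega)]
          have h2 : num - count - 1 - 1 = num - (count + 1) - 1 := by omega
          rw [h2]
        · have hcond : ¬ (1 ≤ num - count ∧ num - count ≤ (((pvPos rest (i + 1)).length + 1 : Nat) : Int)) := by
            push_cast
            push_cast at hin
            omega
          rw [if_neg hin, if_neg hcond]

-- ===== VERDICT (by name: the statement is the Claim_ definition above) =====
theorem index_at_residue_spec : Claim_equal_index_at_residue := by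
  intro seq num _
  show index_at_residue seq num = index_at_residue_alt seq num
  simp only [index_at_residue, index_at_residue_alt, pvPos_eq_filterMap, pvALoop_eq]
  norm_num
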